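-- pv_equiv track=rewrite | github.com/KCachel/prefair | src/groupaware_stv.py | _get_considered_by_group
-- ===== SOURCE A (Python) =====
-- def _get_considered_by_group(item_group_dict):
--     """
--     Create dictionary of groups (keys) and their candidates that can be elected (values)
--     :param item_group_dict: Dictionary where candidates are keys and values are their groups
--     :return: group_considered_candidates
--     """
--     group_considered_candidates = {}
--     for cand, group in item_group_dict.items():
--         if group in group_considered_candidates: # group is already in dictionary
--             group_considered_candidates[group] = group_considered_candidates[group] + [cand]
--         else:
--             group_considered_candidates[group] = [cand]
--     return group_considered_candidates
-- ===== SOURCE B (Python) =====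
-- def _get_considered_by_group(item_group_dict):
--     """Invert candidate->group dict into group->candidates dict (order preserved)."""
--     groups = dict.fromkeys(item_group_dict.values())
--     return {g: [c for c, gr in item_group_dict.items() if gr == g] for g in groups}
-- ===== Notes on version B (the rewrite author's own statement) =====
-- stated objective: faster
-- what changed: Replaces the single accumulating pass (which rebuilds each group's bucket with 'old + [cand]', copying the bucket on every append) by a two-stage structure: dedupe the groups via dict.fromkeys(values()), then build each group's candidate list once with a comprehension scan per group.
import Mathlib
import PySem

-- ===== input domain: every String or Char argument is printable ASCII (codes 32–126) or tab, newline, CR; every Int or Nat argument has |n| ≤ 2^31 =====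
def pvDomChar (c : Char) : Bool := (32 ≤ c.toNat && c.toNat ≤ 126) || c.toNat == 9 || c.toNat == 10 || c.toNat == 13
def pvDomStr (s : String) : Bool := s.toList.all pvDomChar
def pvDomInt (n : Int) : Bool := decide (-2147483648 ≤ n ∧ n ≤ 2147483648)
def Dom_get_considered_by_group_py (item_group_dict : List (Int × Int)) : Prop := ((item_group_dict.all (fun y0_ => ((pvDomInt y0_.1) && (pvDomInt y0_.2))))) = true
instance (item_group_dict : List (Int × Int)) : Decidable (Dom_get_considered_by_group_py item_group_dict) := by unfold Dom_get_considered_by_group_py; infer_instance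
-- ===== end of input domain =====

-- B builds the output in two stages (dedupe the groups, then one scan per group) instead of
-- A's single accumulating pass, which rebuilds the bucket with list concatenation on every append.

-- ===== PORT A =====
-- A: one pass over the items, appending each candidate to its group's bucket.
def get_considered_by_group_py (item_group_dict : List (Int × Int)) : List (Int × List Int) :=
  (item_group_dict.foldl
    (fun (d : PySem.Dict Int (List Int)) p =>
      if d.contains p.2 then
        d.insert p.2 (d.getD p.2 [] ++ [p.1])   -- group already in dictionary
      else
        d.insert p.2 [p.1])
    PySem.Dict.empty).items

-- ===== PORT B =====
-- B: dict.fromkeys(values()) = PySem.List.dedup; then one comprehension scan per group.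
def get_considered_by_group_py_alt (item_group_dict : List (Int × Int)) : List (Int × List Int) :=
  (PySem.List.dedup (item_group_dict.map (fun p => p.2))).map
    (fun g => (g, (item_group_dict.filter (fun p => p.2 == g)).map (fun p => p.1)))

-- ===== PRECONDITION & SPEC =====
def Spec_get_considered_by_group_py (item_group_dict : List (Int × Int)) (out : List (Int × List Int)) : Prop := out = get_considered_by_group_py_alt item_group_dict
instance (item_group_dict : List (Int × Int)) (out : List (Int × List Int)) : Decidable (Spec_get_considered_by_group_py item_group_dict out) := by unfold Spec_get_considered_by_group_py; infer_instance

-- ===== CLAIM (what is proved, stated in full; the proofs are below) =====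
def Claim_equal_get_considered_by_group_py : Prop := ∀ (item_group_dict : List (Int × Int)), Dom_get_considered_by_group_py item_group_dict → Spec_get_considered_by_group_py item_group_dict (get_considered_by_group_py item_group_dict)

-- ===== LEMMAS AND PROOFS =====

-- A's loop body, with the `if` pushed inside the insert.
theorem pvStep_eq (d : PySem.Dict Int (List Int)) (p : Int × Int) :
    (if d.contains p.2 then d.insert p.2 (d.getD p.2 [] ++ [p.1]) else d.insert p.2 [p.1])
      = d.insert p.2 (if d.contains p.2 then d.getD p.2 [] ++ [p.1] else [p.1]) := by
  split <;> rfl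

theorem pvFold_eq (l : List (Int × Int)) (d : PySem.Dict Int (List Int)) :
    l.foldl (fun d p => if d.contains p.2 then d.insert p.2 (d.getD p.2 [] ++ [p.1]) else d.insert p.2 [p.1]) d
      = l.foldl (fun d p => d.insert p.2 (if d.contains p.2 then d.getD p.2 [] ++ [p.1] else [p.1])) d := by
  induction l generalizing d with
  | nil => rfl
  | cons p t ih => rw [List.foldl_cons, List.foldl_cons, pvStep_eq]; exact ih _

-- value of the fold at any key: the bucket is the previous bucket plus the matching candidates
theorem pvFold_getD (l : List (Int × Int)) (d : PySem.Dict Int (List Int)) (g : Int) :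
    (l.foldl (fun d p => d.insert p.2 (if d.contains p.2 then d.getD p.2 [] ++ [p.1] else [p.1])) d).getD g []
      = d.getD g [] ++ (l.filter (fun p => p.2 == g)).map (fun p => p.1) := by
  induction l generalizing d with
  | nil => simp
  | cons p t ih =>
    simp only [List.foldl]
    rw [ih, PySem.Dict.getD_insert]
    by_cases hg : g = p.2
    · rw [if_pos hg]
      by_cases hc : d.contains p.2
      · rw [if_pos hc]
        simp [hg, List.append_assoc]
      · rw [if_neg hc]
        have h0 : d.getD g [] = [] :=
          PySem.Dict.getD_of_not_contains d [] (by rw [hg]; simpa using hc)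
        rw [hg] at h0
        simp [hg, h0]
    · rw [if_neg hg]
      have hne : (p.2 == g) = false := beq_eq_false_iff_ne.mpr (fun h => hg h.symm)
      rw [List.filter_cons, if_neg (by simp [hne])]

theorem get_considered_by_group_py_spec_aux (l : List (Int × Int)) :
    get_considered_by_group_py l = get_considered_by_group_py_alt l := by
  unfold get_considered_by_group_py get_considered_by_group_py_alt
  rw [pvFold_eq]
  set F := fun (d : PySem.Dict Int (List Int)) (p : Int × Int) =>
    d.insert p.2 (if d.contains p.2 then d.getD p.2 [] ++ [p.1] else [p.1]) with hF
  have hnd : (l.foldl F PySem.Dict.empty).keys.Nodup := by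
    exact PySem.Dict.nodup_keys_foldl_insert_key l (fun p => p.2) _ _ PySem.Dict.nodup_keys_empty
  have hkeys : (l.foldl F PySem.Dict.empty).keys = PySem.List.dedup (l.map (fun p => p.2)) := by
    rw [hF, PySem.Dict.keys_foldl_insert_key]
    simp [PySem.Dict.keys_empty, PySem.Set.update_nil_left]
  rw [PySem.Dict.items_eq_map_keys _ hnd ([] : List Int), hkeys]
  refine List.map_congr_left (fun g _ => ?_)
  rw [hF, pvFold_getD]
  simp

-- ===== VERDICT (by name: the statement is the Claim_ definition above) =====
theorem get_considered_by_group_py_spec : Claim_equal_get_considered_by_group_py := by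
  intro l _
  exact get_considered_by_group_py_spec_aux l
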